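-- pv_equiv track=rewrite | github.com/suttonallan/assistant-gazelle-v5 | modules/briefing/client_intelligence_service.py | _match_piano_from_context
-- ===== SOURCE A (Python) =====
-- from typing import Dict, List, Optional, Any
--
-- def _match_piano_from_context(pianos: List[Dict], appt: Dict) -> Dict:
--     """Find the piano matching the appointment based on description/title."""
--     if not pianos:
--         return {}
--     if len(pianos) == 1:
--         return pianos[0]
--
--     search_text = " ".join([
--         appt.get('title', ''), appt.get('description', ''), appt.get('notes', ''),
--     ]).lower()
--
--     if not search_text.strip():
--         return pianos[0]
--
--     # 1. Match par numéro de série (le plus fiable)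
--     for piano in pianos:
--         sn = (piano.get('serial_number') or '').strip()
--         if sn and len(sn) >= 4 and sn in search_text:
--             return piano
--
--     # 2. Match par salle/location
--     for piano in pianos:
--         loc = (piano.get('location') or '').lower().strip()
--         if loc and len(loc) >= 3 and loc in search_text:
--             return piano
--         # Aussi vérifier si la salle du RV est dans la location du piano
--         if loc:
--             for word in search_text.split():
--                 if len(word) >= 3 and word in loc:
--                     return piano
--
--     # 3. Match par marque
--     for piano in pianos:
--         make = (piano.get('make') or '').lower()
--         if make and len(make) > 2 and make in search_text:
--             return piano
--
--     # 4. Match par modèle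
--     for piano in pianos:
--         model = (piano.get('model') or '').lower()
--         if model and len(model) > 2 and model in search_text:
--             return piano
--
--     # 5. Match par type
--     if 'queue' in search_text or 'grand' in search_text:
--         for piano in pianos:
--             ptype = (piano.get('type') or '').lower()
--             if ptype in ['grand', 'queue', 'baby grand']:
--                 return piano
--
--     return pianos[0]
-- ===== SOURCE B (Python) =====
-- def _match_piano_from_context(pianos, appt):
--     """Find the piano matching the appointment based on description/title."""
--     if not pianos:
--         return {}
--     if len(pianos) == 1:
--         return pianos[0]
--
--     search_text = " ".join([
--         appt.get('title', ''), appt.get('description', ''), appt.get('notes', ''),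
--     ]).lower()
--
--     if not search_text.strip():
--         return pianos[0]
--
--     words = search_text.split()
--     type_hint = 'queue' in search_text or 'grand' in search_text
--
--     def tier(piano):
--         # smallest priority tier this piano satisfies (6 = no match)
--         sn = (piano.get('serial_number') or '').strip()
--         if sn and len(sn) >= 4 and sn in search_text:
--             return 1
--         loc = (piano.get('location') or '').lower().strip()
--         if loc and (len(loc) >= 3 and loc in search_text
--                     or any(len(w) >= 3 and w in loc for w in words)):
--             return 2
--         make = (piano.get('make') or '').lower()
--         if make and len(make) > 2 and make in search_text:
--             return 3
--         model = (piano.get('model') or '').lower()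
--         if model and len(model) > 2 and model in search_text:
--             return 4
--         if type_hint and (piano.get('type') or '').lower() in ('grand', 'queue', 'baby grand'):
--             return 5
--         return 6
--
--     # single pass: first piano with the minimal tier; pianos[0] if none matches
--     best_p, best_t = pianos[0], 6
--     for p in pianos:
--         t = tier(p)
--         if t < best_t:
--             best_p, best_t = p, t
--     return best_p
-- ===== Notes on version B (the rewrite author's own statement) =====
-- stated objective: alternative
-- what changed: A's five sequential priority scans over the piano list (serial, location, make, model, type) are replaced by a single pass that computes each piano's smallest satisfied tier and keeps the first piano with the minimal tier.
import Mathlib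
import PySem

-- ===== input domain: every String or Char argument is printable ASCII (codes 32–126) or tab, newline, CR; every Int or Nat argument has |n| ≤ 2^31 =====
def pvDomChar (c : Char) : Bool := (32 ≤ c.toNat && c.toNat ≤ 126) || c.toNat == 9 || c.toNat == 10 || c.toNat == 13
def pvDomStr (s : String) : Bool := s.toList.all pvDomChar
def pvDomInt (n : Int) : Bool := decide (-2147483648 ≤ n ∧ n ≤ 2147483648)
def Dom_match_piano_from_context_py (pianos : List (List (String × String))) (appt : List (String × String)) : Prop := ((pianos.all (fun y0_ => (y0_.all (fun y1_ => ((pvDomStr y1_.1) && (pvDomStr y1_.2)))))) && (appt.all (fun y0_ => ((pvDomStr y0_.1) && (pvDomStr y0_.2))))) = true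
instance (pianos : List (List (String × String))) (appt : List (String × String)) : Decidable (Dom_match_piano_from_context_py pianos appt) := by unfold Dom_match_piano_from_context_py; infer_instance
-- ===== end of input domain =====

-- B replaces A's five sequential scans over `pianos` by one pass that keeps the first piano
-- with the smallest satisfied priority tier (objective: alternative decomposition, same cost).

-- ===== PORT A =====
-- search_text = " ".join([title, description, notes]).lower()
def pvSearchText (appt : List (String × String)) : String :=
  PySem.Str.lower (PySem.Str.join " "
    [(PySem.Dict.mk appt).getD "title" "",
     (PySem.Dict.mk appt).getD "description" "",
     (PySem.Dict.mk appt).getD "notes" ""])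

-- tier-1 test: serial number (stripped), nonempty, length >= 4, contained in the text
def pvCond1 (text : String) (p : List (String × String)) : Bool :=
  let sn := PySem.Str.strip ((PySem.Dict.mk p).getD "serial_number" "")
  !(sn == "") && decide (4 ≤ PySem.Str.len sn) && PySem.Str.isIn sn text

-- tier-2 test, first clause: location (lowered, stripped) nonempty, length >= 3, in the text
def pvCond2a (text : String) (p : List (String × String)) : Bool :=
  let loc := PySem.Str.strip (PySem.Str.lower ((PySem.Dict.mk p).getD "location" ""))
  !(loc == "") && decide (3 ≤ PySem.Str.len loc) && PySem.Str.isIn loc text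

-- tier-2 test, second clause: some word of the text (length >= 3) occurs in the location
def pvCond2b (text : String) (p : List (String × String)) : Bool :=
  let loc := PySem.Str.strip (PySem.Str.lower ((PySem.Dict.mk p).getD "location" ""))
  !(loc == "") && (PySem.Str.split₀ text).any
      (fun w => decide (3 ≤ PySem.Str.len w) && PySem.Str.isIn w loc)

-- tier-3 test: make (lowered) nonempty, length > 2, in the text
def pvCond3 (text : String) (p : List (String × String)) : Bool :=
  let mk := PySem.Str.lower ((PySem.Dict.mk p).getD "make" "")
  !(mk == "") && decide (2 < PySem.Str.len mk) && PySem.Str.isIn mk text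

-- tier-4 test: model (lowered) nonempty, length > 2, in the text
def pvCond4 (text : String) (p : List (String × String)) : Bool :=
  let md := PySem.Str.lower ((PySem.Dict.mk p).getD "model" "")
  !(md == "") && decide (2 < PySem.Str.len md) && PySem.Str.isIn md text

-- tier-5 test: type (lowered) is one of 'grand', 'queue', 'baby grand'
def pvCond5 (p : List (String × String)) : Bool :=
  let pt := PySem.Str.lower ((PySem.Dict.mk p).getD "type" "")
  pt == "grand" || pt == "queue" || pt == "baby grand"

def match_piano_from_context_py (pianos : List (List (String × String))) (appt : List (String × String)) : List (String × String) :=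
  match pianos with
  | [] => []
  | [p] => p
  | p0 :: _ :: _ =>
    let text := pvSearchText appt
    if PySem.Str.strip text == "" then p0
    else
      match pianos.find? (fun p => pvCond1 text p) with
      | some p => p
      | none =>
        match pianos.find? (fun p => pvCond2a text p || pvCond2b text p) with
        | some p => p
        | none =>
          match pianos.find? (fun p => pvCond3 text p) with
          | some p => p
          | none =>
            match pianos.find? (fun p => pvCond4 text p) with
            | some p => p
            | none =>
              if PySem.Str.isIn "queue" text || PySem.Str.isIn "grand" text then
                match pianos.find? (fun p => pvCond5 p) with
                | some p => p
                | none => p0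
              else p0

-- ===== PORT B =====
-- B builds the same search text (title + description + notes, lowered)
def pvSearchTextB (appt : List (String × String)) : String :=
  PySem.Str.lower (PySem.Str.join " "
    [(PySem.Dict.mk appt).getD "title" "",
     (PySem.Dict.mk appt).getD "description" "",
     (PySem.Dict.mk appt).getD "notes" ""])

-- smallest priority tier the piano satisfies (6 = no match), as in Source B's `tier`
def pvTier (text : String) (words : List String) (hint : Bool) (p : List (String × String)) : Nat :=
  let sn := PySem.Str.strip ((PySem.Dict.mk p).getD "serial_number" "")
  if !(sn == "") && decide (4 ≤ PySem.Str.len sn) && PySem.Str.isIn sn text then 1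
  else
    let loc := PySem.Str.strip (PySem.Str.lower ((PySem.Dict.mk p).getD "location" ""))
    if !(loc == "") && (decide (3 ≤ PySem.Str.len loc) && PySem.Str.isIn loc text
          || words.any (fun w => decide (3 ≤ PySem.Str.len w) && PySem.Str.isIn w loc)) then 2
    else
      let mk := PySem.Str.lower ((PySem.Dict.mk p).getD "make" "")
      if !(mk == "") && decide (2 < PySem.Str.len mk) && PySem.Str.isIn mk text then 3
      else
        let md := PySem.Str.lower ((PySem.Dict.mk p).getD "model" "")
        if !(md == "") && decide (2 < PySem.Str.len md) && PySem.Str.isIn md text then 4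
        else
          let pt := PySem.Str.lower ((PySem.Dict.mk p).getD "type" "")
          if hint && (pt == "grand" || pt == "queue" || pt == "baby grand") then 5
          else 6

def match_piano_from_context_py_alt (pianos : List (List (String × String))) (appt : List (String × String)) : List (String × String) :=
  match pianos with
  | [] => []
  | [p] => p
  | p0 :: _ :: _ =>
    let text := pvSearchTextB appt
    if PySem.Str.strip text == "" then p0
    else
      let words := PySem.Str.split₀ text
      let hint := PySem.Str.isIn "queue" text || PySem.Str.isIn "grand" text
      -- single pass keeping the first piano of minimal tier
      (pianos.foldl
        (fun (best : List (String × String) × Nat) p =>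
          let t := pvTier text words hint p
          if t < best.2 then (p, t) else best)
        (p0, 6)).1

-- ===== PRECONDITION & SPEC =====
def Spec_match_piano_from_context_py (pianos : List (List (String × String))) (appt : List (String × String)) (out : List (String × String)) : Prop := out = match_piano_from_context_py_alt pianos appt
instance (pianos : List (List (String × String))) (appt : List (String × String)) (out : List (String × String)) : Decidable (Spec_match_piano_from_context_py pianos appt out) := by unfold Spec_match_piano_from_context_py; infer_instance

-- ===== CLAIM (what is proved, stated in full; the proofs are below) =====
def Claim_equal_match_piano_from_context_py : Prop := ∀ (pianos : List (List (String × String))) (appt : List (String × String)), Dom_match_piano_from_context_py pianos appt → Spec_match_piano_from_context_py pianos appt (match_piano_from_context_py pianos appt)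

-- ===== LEMMAS AND PROOFS =====

theorem pvSearchTextB_eq (appt : List (String × String)) :
    pvSearchTextB appt = pvSearchText appt := rfl

-- running minimum of the tiers
def pvMinF {α : Type} (f : α → Nat) (t0 : Nat) (l : List α) : Nat :=
  l.foldl (fun m p => min m (f p)) t0

theorem pvMinF_cons {α : Type} (f : α → Nat) (t0 : Nat) (x : α) (l : List α) :
    pvMinF f t0 (x :: l) = pvMinF f (min t0 (f x)) l := rfl

theorem pvMinF_le {α : Type} (f : α → Nat) (t0 : Nat) (l : List α) :
    pvMinF f t0 l ≤ t0 := by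
  induction l generalizing t0 with
  | nil => simp [pvMinF]
  | cons x l ih => exact le_trans (ih _) (Nat.min_le_left _ _)

theorem pvMinF_le_of_mem {α : Type} (f : α → Nat) (t0 : Nat) {l : List α} {p : α}
    (hp : p ∈ l) : pvMinF f t0 l ≤ f p := by
  induction l generalizing t0 with
  | nil => cases hp
  | cons x l ih =>
    rw [pvMinF_cons]
    rcases List.mem_cons.mp hp with rfl | hp
    · exact le_trans (pvMinF_le f _ l) (Nat.min_le_right _ _)
    · exact ih _ hp

theorem pvMinF_eq_of_ge {α : Type} (f : α → Nat) (t0 : Nat) {l : List α}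
    (h : ∀ p ∈ l, t0 ≤ f p) : pvMinF f t0 l = t0 := by
  induction l generalizing t0 with
  | nil => rfl
  | cons x l ih =>
    rw [pvMinF_cons, Nat.min_eq_left (h x (by simp))]
    exact ih _ fun p hp => h p (List.mem_cons_of_mem _ hp)

theorem pvMinF_attained {α : Type} (f : α → Nat) (t0 : Nat) (l : List α)
    (h : pvMinF f t0 l < t0) : ∃ p ∈ l, f p = pvMinF f t0 l := by
  induction l generalizing t0 with
  | nil => simp [pvMinF] at h
  | cons x l ih =>
    rw [pvMinF_cons] at h ⊢
    by_cases h2 : pvMinF f (min t0 (f x)) l < min t0 (f x)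
    · obtain ⟨p, hp, hp'⟩ := ih _ h2
      exact ⟨p, List.mem_cons_of_mem _ hp, hp'⟩
    · have hle := pvMinF_le f (min t0 (f x)) l
      have hmin : pvMinF f (min t0 (f x)) l = min t0 (f x) := by omega
      have : min t0 (f x) = f x := by omega
      exact ⟨x, by simp, by omega⟩

-- find? only looks at members
theorem pv_find?_congr {α : Type} (l : List α) (p q : α → Bool)
    (h : ∀ x ∈ l, p x = q x) : l.find? p = l.find? q := by
  induction l with
  | nil => rfl
  | cons x l ih =>
    have hx := h x (by simp)
    by_cases hq : q x = true
    · rw [List.find?_cons_of_pos (hx ▸ hq), List.find?_cons_of_pos hq]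
    · rw [List.find?_cons_of_neg (by rw [hx]; exact hq), List.find?_cons_of_neg hq]
      exact ih fun y hy => h y (List.mem_cons_of_mem _ hy)

-- the argmin fold: first element whose tier equals the global minimum, if it improves on t0
theorem pv_fold_argmin {α : Type} (f : α → Nat) (l : List α) (a0 : α) (t0 : Nat) :
    l.foldl (fun (b : α × Nat) p => if f p < b.2 then (p, f p) else b) (a0, t0)
      = if l.any (fun p => decide (f p < t0)) then
          ((l.find? (fun p => decide (f p = pvMinF f t0 l))).getD a0, pvMinF f t0 l)
        else (a0, t0) := by
  induction l generalizing a0 t0 with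
  | nil => simp
  | cons x l ih =>
    simp only [List.foldl_cons]
    by_cases hx : f x < t0
    · rw [if_pos hx, ih]
      have hmin : pvMinF f t0 (x :: l) = pvMinF f (f x) l := by
        rw [pvMinF_cons, Nat.min_eq_right (le_of_lt hx)]
      have hany : ((x :: l).any fun p => decide (f p < t0)) = true := by
        simp only [List.any_cons, Bool.or_eq_true]; left; simpa using hx
      by_cases hl : (l.any fun p => decide (f p < f x)) = true
      · rw [if_pos hl, if_pos hany, hmin]
        obtain ⟨q, hq, hq'⟩ := List.any_eq_true.mp hl
        simp only [decide_eq_true_eq] at hq'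
        have hlt : pvMinF f (f x) l < f x :=
          lt_of_le_of_lt (pvMinF_le_of_mem f _ hq) hq'
        rw [List.find?_cons_of_neg (by simp only [decide_eq_true_eq]; omega)]
        obtain ⟨s, hs, hs'⟩ := pvMinF_attained f (f x) l hlt
        have hsome : (List.find? (fun p => decide (f p = pvMinF f (f x) l)) l).isSome = true :=
          List.find?_isSome.mpr ⟨s, hs, by simp only [decide_eq_true_eq]; exact hs'⟩
        obtain ⟨r, hr⟩ := Option.isSome_iff_exists.mp hsome
        rw [hr]
        rfl
      · rw [if_neg hl, if_pos hany]
        have hge : ∀ p ∈ l, f x ≤ f p := by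
          intro p hp
          by_contra hcon
          exact hl (List.any_eq_true.mpr ⟨p, hp, by simp only [decide_eq_true_eq]; omega⟩)
        have hmin2 : pvMinF f t0 (x :: l) = f x := by
          rw [hmin]; exact pvMinF_eq_of_ge f _ hge
        rw [hmin2, List.find?_cons_of_pos (by simp)]
        rfl
    · rw [if_neg hx, ih]
      have hmin : pvMinF f t0 (x :: l) = pvMinF f t0 l := by
        rw [pvMinF_cons, Nat.min_eq_left (by omega)]
      by_cases hl : (l.any fun p => decide (f p < t0)) = true
      · rw [if_pos hl, if_pos (by simp only [List.any_cons, Bool.or_eq_true]; right; exact hl), hmin]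
        have hlt : pvMinF f t0 l < t0 := by
          obtain ⟨q, hq, hq'⟩ := List.any_eq_true.mp hl
          simp only [decide_eq_true_eq] at hq'
          exact lt_of_le_of_lt (pvMinF_le_of_mem f _ hq) hq'
        rw [List.find?_cons_of_neg (by simp only [decide_eq_true_eq]; omega)]
      · rw [if_neg hl, if_neg (by
          simp only [List.any_cons, Bool.or_eq_true, not_or]
          exact ⟨by simpa using hx, hl⟩)]

-- the A-side condition of tier k (k = 1..5)
def pvCondK (text : String) (k : Nat) (p : List (String × String)) : Bool :=
  match k with
  | 1 => pvCond1 text p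
  | 2 => pvCond2a text p || pvCond2b text p
  | 3 => pvCond3 text p
  | 4 => pvCond4 text p
  | 5 => (PySem.Str.isIn "queue" text || PySem.Str.isIn "grand" text) && pvCond5 p
  | _ => false

-- B's tier function is the first k with pvCondK, else 6
theorem pvTier_eq (text : String) (p : List (String × String)) :
    pvTier text (PySem.Str.split₀ text)
        (PySem.Str.isIn "queue" text || PySem.Str.isIn "grand" text) p
      = if pvCondK text 1 p then 1 else if pvCondK text 2 p then 2
        else if pvCondK text 3 p then 3 else if pvCondK text 4 p then 4
        else if pvCondK text 5 p then 5 else 6 := by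
  simp only [pvTier, pvCondK, pvCond1, pvCond2a, pvCond2b, pvCond3, pvCond4, pvCond5,
    Bool.and_or_distrib_left, Bool.and_assoc]

theorem pvTier_ge_one (text : String) (words : List String) (hint : Bool)
    (p : List (String × String)) : 1 ≤ pvTier text words hint p := by
  simp only [pvTier]
  split_ifs <;> omega

theorem pvCondK_of_tier_eq {text : String} {p : List (String × String)} {k : Nat}
    (hk : pvTier text (PySem.Str.split₀ text)
        (PySem.Str.isIn "queue" text || PySem.Str.isIn "grand" text) p = k) (hk5 : k ≤ 5) :
    pvCondK text k p = true := by
  rw [pvTier_eq] at hk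
  split_ifs at hk <;> first | (cases hk; assumption) | omega

theorem pvTier_le_of_condK {text : String} {p : List (String × String)} {k : Nat}
    (hk : pvCondK text k p = true) :
    pvTier text (PySem.Str.split₀ text)
        (PySem.Str.isIn "queue" text || PySem.Str.isIn "grand" text) p ≤ k := by
  rw [pvTier_eq]
  rcases k with _|_|_|_|_|_|n
  · simp [pvCondK] at hk
  · simp [hk]
  · split_ifs <;> omega
  · split_ifs <;> omega
  · split_ifs <;> omega
  · split_ifs <;> omega
  · split_ifs <;> omega

-- the five-scan chain equals the single-pass argmin over tiers
theorem pv_core (text : String) (L : List (List (String × String)))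
    (p0 : List (String × String)) :
    (match L.find? (fun p => pvCond1 text p) with
     | some p => p
     | none =>
       match L.find? (fun p => pvCond2a text p || pvCond2b text p) with
       | some p => p
       | none =>
         match L.find? (fun p => pvCond3 text p) with
         | some p => p
         | none =>
           match L.find? (fun p => pvCond4 text p) with
           | some p => p
           | none =>
             if PySem.Str.isIn "queue" text || PySem.Str.isIn "grand" text then
               match L.find? (fun p => pvCond5 p) with
               | some p => p
               | none => p0
             else p0)
    = (L.foldl (fun (best : List (String × String) × Nat) p =>
          if pvTier text (PySem.Str.split₀ text)
              (PySem.Str.isIn "queue" text || PySem.Str.isIn "grand" text) p < best.2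
          then (p, pvTier text (PySem.Str.split₀ text)
              (PySem.Str.isIn "queue" text || PySem.Str.isIn "grand" text) p)
          else best) (p0, 6)).1 := by
  have hfold := pv_fold_argmin (fun p => pvTier text (PySem.Str.split₀ text)
      (PySem.Str.isIn "queue" text || PySem.Str.isIn "grand" text) p) L p0 6
  simp only [] at hfold
  rw [hfold]
  by_cases hany : (L.any fun p => decide (pvTier text (PySem.Str.split₀ text)
      (PySem.Str.isIn "queue" text || PySem.Str.isIn "grand" text) p < 6)) = true
  · rw [if_pos hany]
    have hm6 : pvMinF (fun p => pvTier text (PySem.Str.split₀ text)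
        (PySem.Str.isIn "queue" text || PySem.Str.isIn "grand" text) p) 6 L < 6 := by
      obtain ⟨q, hq, hq'⟩ := List.any_eq_true.mp hany
      simp only [decide_eq_true_eq] at hq'
      exact lt_of_le_of_lt (pvMinF_le_of_mem _ _ hq) hq'
    obtain ⟨q, hqL, hq⟩ := pvMinF_attained _ 6 L hm6
    have hstep : ∀ j, j < pvMinF (fun p => pvTier text (PySem.Str.split₀ text)
        (PySem.Str.isIn "queue" text || PySem.Str.isIn "grand" text) p) 6 L →
        L.find? (fun p => pvCondK text j p) = none := by
      intro j hj
      apply List.find?_eq_none.mpr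
      intro x hx hc
      have h1 := pvTier_le_of_condK hc
      have h2 := pvMinF_le_of_mem (fun p => pvTier text (PySem.Str.split₀ text)
        (PySem.Str.isIn "queue" text || PySem.Str.isIn "grand" text) p) 6 hx
      simp only [] at h2
      omega
    obtain ⟨m, hmdef⟩ : ∃ m, pvMinF (fun p => pvTier text (PySem.Str.split₀ text)
        (PySem.Str.isIn "queue" text || PySem.Str.isIn "grand" text) p) 6 L = m := ⟨_, rfl⟩
    rw [hmdef] at hm6 hq hstep ⊢
    have hm1 : 1 ≤ m := hq ▸ pvTier_ge_one text _ _ q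
    have heqk : m ≤ 5 → L.find? (fun p => pvCondK text m p)
        = L.find? (fun p => decide (pvTier text (PySem.Str.split₀ text)
            (PySem.Str.isIn "queue" text || PySem.Str.isIn "grand" text) p = m)) := by
      intro hk5
      apply pv_find?_congr
      intro x hx
      by_cases hfx : pvTier text (PySem.Str.split₀ text)
          (PySem.Str.isIn "queue" text || PySem.Str.isIn "grand" text) x = m
      · rw [pvCondK_of_tier_eq hfx hk5, hfx]
        simp
      · have : pvCondK text m x = false := by
          cases hb : pvCondK text m x
          · rfl
          · have h1 := pvTier_le_of_condK hb
            have h2 : m ≤ pvTier text (PySem.Str.split₀ text)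
                (PySem.Str.isIn "queue" text || PySem.Str.isIn "grand" text) x := by
              have := pvMinF_le_of_mem (fun p => pvTier text (PySem.Str.split₀ text)
                (PySem.Str.isIn "queue" text || PySem.Str.isIn "grand" text) p) 6 hx
              simp only [] at this
              omega
            omega
        rw [this]
        exact (decide_eq_false hfx).symm
    have hsome : ∀ hk5 : m ≤ 5, ∃ r, L.find? (fun p => pvCondK text m p) = some r := by
      intro hk5
      apply Option.isSome_iff_exists.mp
      rw [heqk hk5]
      exact List.find?_isSome.mpr ⟨q, hqL, by simp only [decide_eq_true_eq]; exact hq⟩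
    interval_cases m
    · obtain ⟨r, hr⟩ := hsome (by omega)
      have hr1 : L.find? (fun p => pvCond1 text p) = some r := hr
      rw [hr1]
      rw [heqk (by omega)] at hr
      rw [hr]
      rfl
    · have h1 : L.find? (fun p => pvCond1 text p) = none := hstep 1 (by omega)
      obtain ⟨r, hr⟩ := hsome (by omega)
      have hr2 : L.find? (fun p => pvCond2a text p || pvCond2b text p) = some r := hr
      rw [h1, hr2]
      rw [heqk (by omega)] at hr
      rw [hr]
      rfl
    · have h1 : L.find? (fun p => pvCond1 text p) = none := hstep 1 (by omega)
      have h2 : L.find? (fun p => pvCond2a text p || pvCond2b text p) = none := hstep 2 (by omega)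
      obtain ⟨r, hr⟩ := hsome (by omega)
      have hr3 : L.find? (fun p => pvCond3 text p) = some r := hr
      rw [h1, h2, hr3]
      rw [heqk (by omega)] at hr
      rw [hr]
      rfl
    · have h1 : L.find? (fun p => pvCond1 text p) = none := hstep 1 (by omega)
      have h2 : L.find? (fun p => pvCond2a text p || pvCond2b text p) = none := hstep 2 (by omega)
      have h3 : L.find? (fun p => pvCond3 text p) = none := hstep 3 (by omega)
      obtain ⟨r, hr⟩ := hsome (by omega)
      have hr4 : L.find? (fun p => pvCond4 text p) = some r := hr
      rw [h1, h2, h3, hr4]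
      rw [heqk (by omega)] at hr
      rw [hr]
      rfl
    · have h1 : L.find? (fun p => pvCond1 text p) = none := hstep 1 (by omega)
      have h2 : L.find? (fun p => pvCond2a text p || pvCond2b text p) = none := hstep 2 (by omega)
      have h3 : L.find? (fun p => pvCond3 text p) = none := hstep 3 (by omega)
      have h4 : L.find? (fun p => pvCond4 text p) = none := hstep 4 (by omega)
      have hh : (PySem.Str.isIn "queue" text || PySem.Str.isIn "grand" text) = true := by
        have h5c := pvCondK_of_tier_eq hq (by omega)
        simp only [pvCondK, Bool.and_eq_true] at h5c
        exact h5c.1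
      obtain ⟨r, hr⟩ := hsome (by omega)
      have hr5 : L.find? (fun p => pvCond5 p) = some r := by
        rw [pv_find?_congr L (fun p => pvCond5 p) (fun p => pvCondK text 5 p)
          (fun x _ => by simp only [pvCondK, hh, Bool.true_and])]
        exact hr
      rw [h1, h2, h3, h4, if_pos hh, hr5]
      rw [heqk (by omega)] at hr
      rw [hr]
      rfl
  · rw [if_neg hany]
    have hno : ∀ x ∈ L, ∀ k, k ≤ 5 → ¬ pvCondK text k x = true := by
      intro x hx k hk hc
      have h1 := pvTier_le_of_condK hc
      have h2 : ¬ pvTier text (PySem.Str.split₀ text)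
          (PySem.Str.isIn "queue" text || PySem.Str.isIn "grand" text) x < 6 := by
        intro hlt
        exact hany (List.any_eq_true.mpr ⟨x, hx, by simpa using hlt⟩)
      omega
    have h1 : L.find? (fun p => pvCond1 text p) = none :=
      List.find?_eq_none.mpr fun x hx h => hno x hx 1 (by omega) h
    have h2 : L.find? (fun p => pvCond2a text p || pvCond2b text p) = none :=
      List.find?_eq_none.mpr fun x hx h => hno x hx 2 (by omega) h
    have h3 : L.find? (fun p => pvCond3 text p) = none :=
      List.find?_eq_none.mpr fun x hx h => hno x hx 3 (by omega) h
    have h4 : L.find? (fun p => pvCond4 text p) = none :=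
      List.find?_eq_none.mpr fun x hx h => hno x hx 4 (by omega) h
    rw [h1, h2, h3, h4]
    by_cases hh : (PySem.Str.isIn "queue" text || PySem.Str.isIn "grand" text) = true
    · rw [if_pos hh]
      have h5 : L.find? (fun p => pvCond5 p) = none :=
        List.find?_eq_none.mpr fun x hx h =>
          hno x hx 5 (by omega) (by simp only [pvCondK, hh, h, Bool.true_and])
      rw [h5]
    · rw [if_neg hh]

-- ===== VERDICT (by name: the statement is the Claim_ definition above) =====
theorem match_piano_from_context_py_spec : Claim_equal_match_piano_from_context_py := by
  intro pianos appt _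
  unfold Spec_match_piano_from_context_py
  cases pianos with
  | nil => rfl
  | cons p0 rest =>
  cases rest with
  | nil => rfl
  | cons p1 rest' =>
    simp only [match_piano_from_context_py, match_piano_from_context_py_alt, pvSearchTextB_eq]
    by_cases ht : (PySem.Str.strip (pvSearchText appt) == "") = true
    · simp only [ht, if_true]
    · simp only [ht, Bool.false_eq_true, if_false]
      exact pv_core (pvSearchText appt) (p0 :: p1 :: rest') p0
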